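-- pv_equiv track=rewrite | github.com/JasonSong97/codingtest | 프로그래머스/1/42748. K번째수/K번째수.py | solution
-- ===== SOURCE A (Python) =====
-- def solution(array, commands):
--     answer = []
--     for arr in commands:
--         i = arr[0] - 1
--         j = arr[1]
--         temp = array[i: j] # [5, 2, 6, 3]
--         temp.sort()
--         answer.append(temp[arr[2] - 1])
--     return answer
-- ===== SOURCE B (Python) =====
-- def kth_smallest(pool, k):
--     # partial selection: extract-min k times instead of sorting the whole pool
--     while True:
--         m = min(pool)
--         if k == 1:
--             return m
--         pool.remove(m)
--         k -= 1
--
-- def solution(array, commands):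
--     return [kth_smallest(array[c[0] - 1:c[1]], c[2]) for c in commands]
-- ===== Notes on version B (the rewrite author's own statement) =====
-- stated objective: alternative
-- what changed: B replaces A's full sort of each slice with a partial selection that extracts the minimum k times and returns the k-th extracted value, so no slice is ever sorted.
-- outside the precondition, e.g. on solution([1, 2, 3], [[1, 3, 0]]): A returns [3], B raises ValueError
import Mathlib
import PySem

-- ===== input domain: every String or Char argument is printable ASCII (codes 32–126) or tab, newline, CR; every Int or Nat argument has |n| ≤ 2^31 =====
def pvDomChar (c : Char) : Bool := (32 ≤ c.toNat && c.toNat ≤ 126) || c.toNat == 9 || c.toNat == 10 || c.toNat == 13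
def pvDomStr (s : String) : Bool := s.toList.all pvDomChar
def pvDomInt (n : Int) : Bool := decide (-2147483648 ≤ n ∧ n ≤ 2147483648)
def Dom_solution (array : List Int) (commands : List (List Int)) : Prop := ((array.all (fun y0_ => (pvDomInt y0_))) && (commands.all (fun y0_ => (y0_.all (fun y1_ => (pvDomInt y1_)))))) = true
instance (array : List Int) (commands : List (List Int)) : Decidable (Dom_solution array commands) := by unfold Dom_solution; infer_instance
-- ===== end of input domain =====

-- B replaces A's full sort of each slice by extract-min selection repeated k times (alternative algorithm, similar cost).
-- Pre_ excludes inputs on which A raises (command shorter than 3, k > slice length) and, below, commands with k <= 0,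
-- on which A returns a value only by Python's accidental negative-index wraparound while B's selection loop raises.


-- ===== PORT A =====
def solution (array : List Int) (commands : List (List Int)) : List Int :=
  commands.foldl (fun answer arr =>
    let i := PySem.List.pyGetD arr 0 0 - 1
    let j := PySem.List.pyGetD arr 1 0
    let temp := PySem.List.slice array (some i) (some j)
    let temp := PySem.List.sorted temp (fun x => x) false
    answer ++ [PySem.List.pyGetD temp (PySem.List.pyGetD arr 2 0 - 1) 0]) []

-- ===== PORT B =====
-- B's selection loop: k-th smallest by repeated extract-min; none = min([]) would raise in Python
def kthSmallest (pool : List Int) (k : Int) : Option Int :=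
  match hmin : PySem.List.min? pool (fun x => x) with
  | none => none
  | some m =>
    if k = 1 then some m
    else
      match hrem : PySem.List.remove? pool m with
      | none => none
      | some pool' => kthSmallest pool' (k - 1)
termination_by pool.length
decreasing_by
  have hmem : m ∈ pool := PySem.List.min?_mem hmin
  have he := PySem.List.remove?_eq_some_erase pool m hmem
  rw [he] at hrem
  cases hrem
  have h1 := List.length_erase_of_mem hmem
  have h2 : 0 < pool.length := List.length_pos_of_mem hmem
  omega

def solution_alt (array : List Int) (commands : List (List Int)) : List Int :=
  commands.map (fun c =>
    (kthSmallest
      (PySem.List.slice array (some (PySem.List.pyGetD c 0 0 - 1)) (some (PySem.List.pyGetD c 1 0)))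
      (PySem.List.pyGetD c 2 0)).getD 0)

-- ===== PRECONDITION & SPEC =====
-- Pre_ excludes commands shorter than 3 (A raises IndexError) and k outside [1, slice length]:
-- for k > len A raises IndexError; for k ≤ 0 A's value is negative-index wraparound and B's loop raises ValueError.
def Pre_solution (array : List Int) (commands : List (List Int)) : Prop :=
  ∀ c ∈ commands, 3 ≤ c.length ∧
    1 ≤ PySem.List.pyGetD c 2 0 ∧
    PySem.List.pyGetD c 2 0 ≤
      ((PySem.List.slice array (some (PySem.List.pyGetD c 0 0 - 1)) (some (PySem.List.pyGetD c 1 0))).length : Int)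
instance (array : List Int) (commands : List (List Int)) : Decidable (Pre_solution array commands) := by unfold Pre_solution; infer_instance

def pvWitness_solution : List Int × List (List Int) := ([1, 5, 2, 6, 3], [[2, 5, 3], [4, 4, 1], [1, 5, 2]])

def Spec_solution (array : List Int) (commands : List (List Int)) (out : List Int) : Prop := out = solution_alt array commands
instance (array : List Int) (commands : List (List Int)) (out : List Int) : Decidable (Spec_solution array commands out) := by unfold Spec_solution; infer_instance

-- ===== CLAIM (what is proved, stated in full; the proofs are below) =====
def Claim_equal_solution : Prop := ∀ (array : List Int) (commands : List (List Int)), Dom_solution array commands → Pre_solution array commands → Spec_solution array commands (solution array commands)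

-- ===== LEMMAS AND PROOFS =====

-- head/tail characterisation of Python's sort: the minimum comes first, the rest is the sort of the remainder
theorem sorted_eq_min_cons_sorted_erase {pool : List Int} {m : Int}
    (hm : PySem.List.min? pool (fun x => x) = some m) :
    PySem.List.sorted pool (fun x => x) false =
      m :: PySem.List.sorted (pool.erase m) (fun x => x) false := by
  have hmem : m ∈ pool := PySem.List.min?_mem hm
  apply PySem.List.sorted_id_eq_of_perm_of_pairwise
  · exact (List.Perm.cons m (PySem.List.sorted_perm _ _ _)).trans
      (List.perm_cons_erase hmem).symm
  · refine List.Pairwise.cons ?_ ?_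
    · intro y hy
      exact PySem.List.min?_isMin hm y
        (List.mem_of_mem_erase ((PySem.List.mem_sorted _ _ _ _).1 hy))
    · exact PySem.List.sorted_pairwise (pool.erase m) (fun x => x)

-- B's selection loop computes the (k-1)-indexed element of the sorted pool
theorem kthSmallest_eq_sorted_get (n : Nat) :
    ∀ (pool : List Int) (k : Int), pool.length = n → 1 ≤ k → k ≤ (pool.length : Int) →
    kthSmallest pool k =
      some (PySem.List.pyGetD (PySem.List.sorted pool (fun x => x) false) (k - 1) 0) := by
  induction n with
  | zero => intro pool k h h1 h2; omega
  | succ n ih =>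
    intro pool k h h1 h2
    have hne : pool ≠ [] := by intro hcon; simp [hcon] at h
    obtain ⟨m, hm⟩ : ∃ m, PySem.List.min? pool (fun x => x) = some m := by
      cases hmin : PySem.List.min? pool (fun x => x) with
      | none => exact absurd ((PySem.List.min?_eq_none_iff _ _).1 hmin) hne
      | some m => exact ⟨m, rfl⟩
    have hmem : m ∈ pool := PySem.List.min?_mem hm
    have hsorted := sorted_eq_min_cons_sorted_erase hm
    rw [kthSmallest.eq_def, hm]
    -- reduce the inner match on the rewritten scrutinee
    by_cases hk1 : k = 1
    · subst hk1
      simp [hsorted, PySem.List.pyGetD_zero_cons]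
    · simp only [if_neg hk1]
      rw [PySem.List.remove?_eq_some_erase pool m hmem]
      show kthSmallest (pool.erase m) (k - 1) =
        some (PySem.List.pyGetD (PySem.List.sorted pool (fun x => x) false) (k - 1) 0)
      have herase : (pool.erase m).length = n := by
        have := List.length_erase_of_mem hmem; omega
      rw [ih (pool.erase m) (k - 1) herase (by omega) (by rw [herase]; omega)]
      congr 1
      rw [hsorted]
      have h2k : 2 ≤ k := by omega
      have hlen1 : ((PySem.List.sorted (pool.erase m) (fun x => x) false).length : Int) = n := by
        rw [PySem.List.length_sorted, herase]
      rw [PySem.List.pyGetD_eq_getElem _ 0 (by omega) (by rw [hlen1]; omega),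
          PySem.List.pyGetD_eq_getElem _ 0 (by omega)
            (by simp [PySem.List.length_sorted, herase]; omega)]
      have hidx : (k - 1).toNat = (k - 1 - 1).toNat + 1 := by omega
      simp only [hidx, List.getElem_cons_succ]

-- ===== VERDICT (by name: the statement is the Claim_ definition above) =====
theorem solution_spec : Claim_equal_solution := by
  intro array commands _hdom hpre
  unfold Spec_solution solution solution_alt
  rw [PySem.List.foldl_append_singleton_eq_map]
  simp only [List.nil_append]
  apply List.map_congr_left
  intro c hc
  obtain ⟨_hlen, hk1, hk2⟩ := hpre c hc
  set pool := PySem.List.slice array (some (PySem.List.pyGetD c 0 0 - 1)) (some (PySem.List.pyGetD c 1 0)) with hpool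
  rw [kthSmallest_eq_sorted_get pool.length pool (PySem.List.pyGetD c 2 0) rfl hk1 hk2]
  rfl
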